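-- pv_equiv track=rewrite | github.com/rjovelin/Rosalind | Textbook_track/BA1J/BA1J2.py | FastPatternToNumber
-- ===== SOURCE A (Python) =====
-- def FastPatternToNumber(Pattern):
--     '''
--     (str) -> int
--     Take a string kmer and return the index of that kmer in the list of
--     all possible kmers of length k ordered lexicographically
--     '''
--
--     # use the following relationship
--     # PatternToNumber(Pattern) = 4 · PatternToNumber(Prefix(Pattern)) + SymbolToNumber(LastSymbol(Pattern))
--     # where Prefix(Pattern) = Pattern minus last symbol
--     # and SymBolToNumber of last symol of Pattern is defined by A = 0, C = 1, G = 2, T =3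
--
--     SymbolToNumber = {'A': 0, 'C': 1, 'G': 2, 'T': 3}
--
--     if Pattern == '':
--         return 0
--     else:
--         symbol = Pattern[-1]
--         prefix = Pattern[:-1]
--         return 4 * FastPatternToNumber(prefix) + SymbolToNumber[symbol]
-- ===== SOURCE B (Python) =====
-- def FastPatternToNumber(Pattern):
--     '''
--     (str) -> int
--     Take a string kmer and return the index of that kmer in the list of
--     all possible kmers of length k ordered lexicographically
--     '''
--     SymbolToNumber = {'A': 0, 'C': 1, 'G': 2, 'T': 3}
--     num = 0
--     for c in Pattern:
--         num = num * 4 + SymbolToNumber[c]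
--     return num
-- ===== Notes on version B (the rewrite author's own statement) =====
-- stated objective: simpler
-- what changed: Replaces the right-to-left recursion on the prefix with a single left-to-right iterative accumulator pass (num = num*4 + digit).
import Mathlib
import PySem

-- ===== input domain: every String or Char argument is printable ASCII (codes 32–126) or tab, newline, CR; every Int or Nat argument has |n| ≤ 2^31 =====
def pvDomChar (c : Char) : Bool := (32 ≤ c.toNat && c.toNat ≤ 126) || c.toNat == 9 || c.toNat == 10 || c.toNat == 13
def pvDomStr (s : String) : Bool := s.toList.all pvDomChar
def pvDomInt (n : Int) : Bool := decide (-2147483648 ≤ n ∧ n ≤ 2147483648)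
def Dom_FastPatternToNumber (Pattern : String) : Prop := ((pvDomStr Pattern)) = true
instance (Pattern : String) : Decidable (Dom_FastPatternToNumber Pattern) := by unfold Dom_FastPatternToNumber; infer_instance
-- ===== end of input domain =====

-- B replaces A's right-to-left recursion on the prefix with one left-to-right accumulator pass; same value everywhere A returns.

-- ===== PORT A =====
-- SymbolToNumber lookup; Python raises KeyError on other symbols — those inputs are excluded by Pre_.
def pvSymbolToNumber (c : Char) : Int :=
  if c = 'A' then 0 else if c = 'C' then 1 else if c = 'G' then 2 else if c = 'T' then 3 else 0

-- A's recursion: empty → 0, else 4 * f(prefix) + SymbolToNumber(last symbol)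
def pvARec (l : List Char) : Int :=
  if h : l = [] then 0
  else 4 * pvARec l.dropLast + pvSymbolToNumber (l.getLast h)
termination_by l.length
decreasing_by
  have : l.length ≠ 0 := by simpa using (List.length_pos_of_ne_nil h).ne'
  simp [List.length_dropLast]; omega

def FastPatternToNumber (Pattern : String) : Int := pvARec Pattern.toList

-- ===== PORT B =====
def FastPatternToNumber_alt (Pattern : String) : Int :=
  Pattern.toList.foldl (fun num c => num * 4 + pvSymbolToNumber c) 0

-- ===== PRECONDITION & SPEC =====
-- Pre_ excludes exactly the inputs on which Python A raises KeyError: characters other than A/C/G/T.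
def Pre_FastPatternToNumber (Pattern : String) : Prop :=
  Pattern.toList.all (fun c => c == 'A' || c == 'C' || c == 'G' || c == 'T') = true
instance (Pattern : String) : Decidable (Pre_FastPatternToNumber Pattern) := by
  unfold Pre_FastPatternToNumber; infer_instance
def pvWitness_FastPatternToNumber : String := "AC"

def Spec_FastPatternToNumber (Pattern : String) (out : Int) : Prop := out = FastPatternToNumber_alt Pattern
instance (Pattern : String) (out : Int) : Decidable (Spec_FastPatternToNumber Pattern out) := by unfold Spec_FastPatternToNumber; infer_instance

-- ===== CLAIM (what is proved, stated in full; the proofs are below) =====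
def Claim_equal_FastPatternToNumber : Prop := ∀ (Pattern : String), Dom_FastPatternToNumber Pattern → Pre_FastPatternToNumber Pattern → Spec_FastPatternToNumber Pattern (FastPatternToNumber Pattern)

-- ===== LEMMAS AND PROOFS =====

-- A's last-symbol recursion computes the same base-4 value as B's left fold
-- (the two in fact agree on every list of characters, Pre_ or not).
theorem pvARec_eq_foldl (n : ℕ) : ∀ l : List Char, l.length = n →
    pvARec l = l.foldl (fun num c => num * 4 + pvSymbolToNumber c) 0 := by
  induction n with
  | zero => intro l hl; simp [List.eq_nil_of_length_eq_zero hl, pvARec]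
  | succ k ih =>
    intro l hl
    have hne : l ≠ [] := by intro h; simp [h] at hl
    rw [pvARec]
    simp only [hne, dite_false]
    have hdl : l.dropLast.length = k := by simp [List.length_dropLast, hl]
    rw [ih l.dropLast hdl]
    conv_rhs => rw [← List.dropLast_append_getLast hne]
    rw [List.foldl_append]
    simp [mul_comm]

-- ===== VERDICT (by name: the statement is the Claim_ definition above) =====
theorem FastPatternToNumber_spec : Claim_equal_FastPatternToNumber := by
  intro P _ _
  unfold Spec_FastPatternToNumber FastPatternToNumber FastPatternToNumber_alt
  exact pvARec_eq_foldl _ P.toList rfl
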